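-- pv_equiv track=rewrite | github.com/jaeyoung011/Python | Study/Grid/큰수의법칙.py | big_number_rule
-- ===== SOURCE A (Python) =====
-- def big_number_rule(data):
--     n, m, k = 5, 8, 3
--     sum = 0
--     first = sorted(data, reverse=True)[0]
--     second = sorted(data, reverse=True)[1]
--
--     # 계산시작
--     for i in range(1,m+1):
--         if i % (k+1) != 0:
--             sum += first
--         else:
--             sum += second
--     return sum
-- ===== SOURCE B (Python) =====
-- def big_number_rule(data):
--     # one pass to find the largest and second-largest, then closed-form sum
--     first = second = None
--     for x in data:
--         if first is None or x > first:
--             first, second = x, first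
--         elif second is None or x > second:
--             second = x
--     return 6 * first + 2 * second
-- ===== Notes on version B (the rewrite author's own statement) =====
-- stated objective: alternative
-- what changed: Replaces the two sorts and the fixed 8-step accumulation loop by a single linear pass that tracks the largest and second-largest element, combined with the closed form 6*first + 2*second.
import Mathlib
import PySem

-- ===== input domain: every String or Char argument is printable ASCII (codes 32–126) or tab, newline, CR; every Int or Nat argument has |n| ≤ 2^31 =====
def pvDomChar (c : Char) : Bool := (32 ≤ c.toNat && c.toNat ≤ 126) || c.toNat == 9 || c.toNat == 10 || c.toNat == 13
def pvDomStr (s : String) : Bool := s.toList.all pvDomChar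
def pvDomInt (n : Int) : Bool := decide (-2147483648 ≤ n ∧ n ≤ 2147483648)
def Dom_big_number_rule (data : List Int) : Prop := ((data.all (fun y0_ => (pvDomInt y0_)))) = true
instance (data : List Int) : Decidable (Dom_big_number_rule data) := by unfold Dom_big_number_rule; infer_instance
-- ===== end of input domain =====

-- B replaces A's two sorts and fixed 8-iteration loop by one linear pass tracking the top two
-- elements plus the closed form 6*first + 2*second.

-- ===== PORT A =====
def big_number_rule (data : List Int) : Int :=
  let first := (PySem.List.pyGet? (PySem.List.sorted data (fun x => x) true) 0).getD 0
  let second := (PySem.List.pyGet? (PySem.List.sorted data (fun x => x) true) 1).getD 0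
  (PySem.List.pyRange 1 9 1).foldl
    (fun sum i => if PySem.Int.mod i 4 ≠ 0 then sum + first else sum + second) 0

-- ===== PORT B =====
-- one step of Source B's loop over state (first, second); Python's None = Option.none
def bnrStep (s : Option Int × Option Int) (x : Int) : Option Int × Option Int :=
  match s with
  | (none, _) => (some x, none)
  | (some a, sec) =>
    if a < x then (some x, some a)
    else
      match sec with
      | none => (some a, some x)
      | some b => if b < x then (some a, some x) else (some a, some b)

def big_number_rule_alt (data : List Int) : Int :=
  let s := data.foldl bnrStep (none, none)
  6 * s.1.getD 0 + 2 * s.2.getD 0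

-- ===== PRECONDITION & SPEC =====
-- A raises IndexError on lists of fewer than two elements (indexing the second sorted element); excluded.
def Pre_big_number_rule (data : List Int) : Prop := 2 ≤ data.length
instance (data : List Int) : Decidable (Pre_big_number_rule data) := by
  unfold Pre_big_number_rule; infer_instance
def pvWitness_big_number_rule : List Int := [3, 7, 2]

def Spec_big_number_rule (data : List Int) (out : Int) : Prop := out = big_number_rule_alt data
instance (data : List Int) (out : Int) : Decidable (Spec_big_number_rule data out) := by
  unfold Spec_big_number_rule; infer_instance

-- ===== CLAIM (what is proved, stated in full; the proofs are below) =====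
def Claim_equal_big_number_rule : Prop :=
  ∀ (data : List Int), Dom_big_number_rule data → Pre_big_number_rule data →
    Spec_big_number_rule data (big_number_rule data)

-- ===== LEMMAS AND PROOFS =====

-- unfolding lemmas for bnrStep on each state shape
theorem bnrStep_nn (o : Option Int) (x : Int) : bnrStep (none, o) x = (some x, none) := rfl
theorem bnrStep_sn (a x : Int) :
    bnrStep (some a, none) x = if a < x then (some x, some a) else (some a, some x) := rfl
theorem bnrStep_ss (a b x : Int) :
    bnrStep (some a, some b) x =
      if a < x then (some x, some a)
      else if b < x then (some a, some x) else (some a, some b) := rfl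

-- bnrStep is right-commutative, so B's fold is invariant under permutation
theorem bnrStep_comm : ∀ (s : Option Int × Option Int) (x y : Int),
    bnrStep (bnrStep s x) y = bnrStep (bnrStep s y) x := by
  rintro ⟨_ | a, _ | b⟩ x y <;>
    simp only [bnrStep_nn, bnrStep_sn, bnrStep_ss] <;>
    (try split_ifs) <;>
    (try simp only [bnrStep_nn, bnrStep_sn, bnrStep_ss]) <;>
    (try split_ifs) <;>
    (try simp only [bnrStep_nn, bnrStep_sn, bnrStep_ss]) <;>
    (try split_ifs) <;>
    (try simp_all only [Prod.mk.injEq, Option.some.injEq, not_lt]) <;>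
    first | rfl | omega | exact ⟨trivial, by omega⟩

-- once the state holds the top two, further (not larger) elements change nothing
theorem bnrFold_fixed (t : List Int) (a b : Int) (hba : b ≤ a)
    (ht : ∀ x ∈ t, x ≤ b) :
    t.foldl bnrStep (some a, some b) = (some a, some b) := by
  induction t with
  | nil => rfl
  | cons x t ih =>
    have hx : x ≤ b := ht x (List.mem_cons_self ..)
    have hstep : bnrStep (some a, some b) x = (some a, some b) := by
      rw [bnrStep_ss, if_neg (by omega), if_neg (by omega)]
    rw [List.foldl_cons, hstep]
    exact ih (fun y hy => ht y (List.mem_cons_of_mem _ hy))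

-- A's fixed 8-iteration loop is the closed form 6*f + 2*s
theorem loop_closed (f s : Int) :
    (PySem.List.pyRange 1 9 1).foldl
      (fun sum i => if PySem.Int.mod i 4 ≠ 0 then sum + f else sum + s) 0
      = 6 * f + 2 * s := by
  have h : PySem.List.pyRange 1 9 1 = [1, 2, 3, 4, 5, 6, 7, 8] := by decide
  have m1 : PySem.Int.mod (1 : Int) 4 ≠ 0 := by decide
  have m2 : PySem.Int.mod (2 : Int) 4 ≠ 0 := by decide
  have m3 : PySem.Int.mod (3 : Int) 4 ≠ 0 := by decide
  have m4 : PySem.Int.mod (4 : Int) 4 = 0 := by decide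
  have m5 : PySem.Int.mod (5 : Int) 4 ≠ 0 := by decide
  have m6 : PySem.Int.mod (6 : Int) 4 ≠ 0 := by decide
  have m7 : PySem.Int.mod (7 : Int) 4 ≠ 0 := by decide
  have m8 : PySem.Int.mod (8 : Int) 4 = 0 := by decide
  rw [h]
  simp only [List.foldl, m1, m2, m3, m4, m5, m6, m7, m8, if_true, if_neg, ne_eq,
    not_true_eq_false, if_false, not_false_eq_true]
  ring

theorem big_number_rule_eq (data : List Int) (h : 2 ≤ data.length) :
    big_number_rule data = big_number_rule_alt data := by
  set srt := PySem.List.sorted data (fun x => x) true with hs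
  have hlen : srt.length = data.length := PySem.List.length_sorted ..
  obtain ⟨a, b, t, hsrt⟩ : ∃ a b t, srt = a :: b :: t := by
    match hst : srt, (hlen ▸ h : 2 ≤ srt.length) with
    | a :: b :: t, _ => exact ⟨a, b, t, rfl⟩
  have hpw : srt.Pairwise (fun p q => q ≤ p) := by
    have := PySem.List.sorted_pairwise_rev data (fun x => x)
    simpa using this
  rw [hsrt] at hpw
  have hba : b ≤ a := (List.pairwise_cons.1 hpw).1 b (List.mem_cons_self ..)
  have hpw' := (List.pairwise_cons.1 hpw).2
  have htb : ∀ x ∈ t, x ≤ b := (List.pairwise_cons.1 hpw').1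
  -- B's fold over data equals B's fold over the sorted list (permutation + commutativity)
  have hperm : data.Perm srt := (PySem.List.sorted_perm data (fun x => x) true).symm
  have hfold : data.foldl bnrStep (none, none) = (some a, some b) := by
    rw [hperm.foldl_eq' (fun x _ y _ z => bnrStep_comm z x y) (none, none), hsrt, List.foldl_cons, List.foldl_cons,
      bnrStep_nn, bnrStep_sn, if_neg (by omega)]
    exact bnrFold_fixed t a b hba htb
  unfold big_number_rule big_number_rule_alt
  rw [← hs, hsrt, hfold]
  simp only [PySem.List.pyGet?, loop_closed]
  have h0 : (0:Int) ≤ (t.length:Int) + 1 := by omega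
  have h1 : (1:Int) ≤ (t.length:Int) + 1 := by omega
  simp [PySem.List.pyIdx?, h0, h1]

-- ===== VERDICT (by name: the statement is the Claim_ definition above) =====
theorem big_number_rule_spec : Claim_equal_big_number_rule := by
  intro data _ hpre
  exact big_number_rule_eq data hpre
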